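-- pv_equiv track=rewrite | github.com/YuvrajSonavane-aka-Fudo/BluePineapple | PythonPrograms/16.12.25/No13.py | commonWords
-- ===== SOURCE A (Python) =====
-- def commonWords(list1):
--     commonwords = []
--     dict1 = {}
--     for i in list1:
--         dict1[i] = 0
--
--     for i in list1:
--         dict1[i] += 1
--
--     for k , v in dict1.items():
--         if v > 1 :
--             commonwords.append(k)
--     return commonwords
-- ===== SOURCE B (Python) =====
-- def commonWords(list1):
--     result = []
--     for w in list1:
--         if list1.count(w) > 1 and w not in result:
--             result.append(w)
--     return result
-- ===== Notes on version B (the rewrite author's own statement) =====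
-- stated objective: simpler
-- what changed: Replaces A's three passes (build a zeroed dict, re-scan to count, scan items to filter) with a single loop that decides membership by re-scanning the list with list.count, so no frequency table is ever built.
import Mathlib
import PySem

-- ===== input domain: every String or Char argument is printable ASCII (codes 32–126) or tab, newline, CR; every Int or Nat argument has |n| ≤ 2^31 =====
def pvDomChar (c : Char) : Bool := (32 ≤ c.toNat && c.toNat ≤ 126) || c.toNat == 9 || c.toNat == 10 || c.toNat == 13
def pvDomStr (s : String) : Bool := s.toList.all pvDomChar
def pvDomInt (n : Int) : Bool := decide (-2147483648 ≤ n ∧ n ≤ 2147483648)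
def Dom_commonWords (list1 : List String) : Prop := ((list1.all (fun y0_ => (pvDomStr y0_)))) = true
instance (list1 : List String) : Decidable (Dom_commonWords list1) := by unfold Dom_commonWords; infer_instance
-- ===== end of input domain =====

-- B drops A's frequency dictionary: one loop over the list, re-scanning with list.count
-- and a membership test on the output; same result, no table (objective: simpler).

-- ===== PORT A =====
-- dict1[i] += 1 is ported as modify with default 0: the key is always present there
-- (it was inserted by the first loop), so the default is never consulted and the port is exact.
def commonWords (list1 : List String) : List String :=
  let dict1 : PySem.Dict String Int :=
    list1.foldl (fun d i => d.insert i 0) PySem.Dict.empty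
  let dict1 : PySem.Dict String Int :=
    list1.foldl (fun d i => d.modify i 0 (· + 1)) dict1
  dict1.items.foldl (fun commonwords kv => if kv.2 > 1 then commonwords ++ [kv.1] else commonwords) []

-- ===== PORT B =====
def commonWords_alt (list1 : List String) : List String :=
  list1.foldl
    (fun result w =>
      if 1 < PySem.List.count list1 w ∧ w ∉ result then result ++ [w] else result)
    []

-- ===== PRECONDITION & SPEC =====
def Spec_commonWords (list1 : List String) (out : List String) : Prop := out = commonWords_alt list1
instance (list1 : List String) (out : List String) : Decidable (Spec_commonWords list1 out) := by unfold Spec_commonWords; infer_instance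

-- ===== CLAIM (what is proved, stated in full; the proofs are below) =====
def Claim_equal_commonWords : Prop := ∀ (list1 : List String), Dom_commonWords list1 → Spec_commonWords list1 (commonWords list1)

-- ===== LEMMAS AND PROOFS =====

-- the common normal form: repeated words of list1, in first-appearance order
def repeatedOf (list1 : List String) : List String :=
  (PySem.Set.ofList list1).filter (fun w => 1 < list1.count w)

theorem getD_foldl_insert_zero (l : List String) (d : PySem.Dict String Int)
    (hd : ∀ v, d.getD v 0 = 0) (v : String) :
    (l.foldl (fun d i => d.insert i 0) d).getD v 0 = 0 := by
  induction l generalizing d with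
  | nil => exact hd v
  | cons x xs ih =>
      refine ih _ (fun w => ?_)
      show (d.insert x 0).getD w 0 = 0
      by_cases h : w = x
      · subst h; simp [PySem.Dict.getD_insert_self]
      · rw [PySem.Dict.getD_insert_of_ne d 0 0 h]; exact hd w

theorem set_update_of_subset (l : List String) (s : PySem.Set String)
    (h : ∀ x ∈ l, x ∈ s) : PySem.Set.update s l = s := by
  induction l generalizing s with
  | nil => rfl
  | cons x xs ih =>
      have hx : PySem.Set.add s x = s := by
        simp [PySem.Set.add, h x (by simp)]
      show PySem.Set.update (PySem.Set.add s x) xs = s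
      rw [hx]
      exact ih s (fun y hy => h y (by simp [hy]))

theorem commonWords_eq_repeated (list1 : List String) :
    commonWords list1 = repeatedOf list1 := by
  simp only [commonWords]
  have hkeys1 : (list1.foldl (fun d i => d.insert i 0) (PySem.Dict.empty : PySem.Dict String Int)).keys
      = PySem.Set.ofList list1 := by
    have := PySem.Dict.keys_foldl_insert list1 (fun _ _ => (0 : Int)) PySem.Dict.empty
    simpa [PySem.Dict.empty, PySem.Set.update, PySem.Set.ofList] using this
  have hkeys2 : (list1.foldl (fun d i => d.modify i 0 (· + 1))
        (list1.foldl (fun d i => d.insert i 0) (PySem.Dict.empty : PySem.Dict String Int))).keys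
      = PySem.Set.ofList list1 := by
    have := PySem.Dict.keys_foldl_modify list1 (0 : Int) (fun _ _ v => v + 1)
      (list1.foldl (fun d i => d.insert i 0) PySem.Dict.empty)
    rw [hkeys1] at this
    rw [this]
    exact set_update_of_subset list1 _ (fun x hx => (PySem.Set.mem_ofList list1 x).mpr hx)
  have hval : ∀ v, (list1.foldl (fun d i => d.modify i 0 (· + 1))
        (list1.foldl (fun d i => d.insert i 0) (PySem.Dict.empty : PySem.Dict String Int))).getD v 0
      = (list1.count v : Int) := by
    intro v
    rw [PySem.Dict.getD_foldl_modify_add_one,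
      getD_foldl_insert_zero list1 PySem.Dict.empty (fun _ => rfl) v]
    simp
  have hitems : (list1.foldl (fun d i => d.modify i 0 (· + 1))
        (list1.foldl (fun d i => d.insert i 0) (PySem.Dict.empty : PySem.Dict String Int))).items
      = (PySem.Set.ofList list1).map (fun k => (k, (list1.count k : Int))) := by
    rw [PySem.Dict.items_eq_map_keys _ (by rw [hkeys2]; exact PySem.Set.nodup_ofList list1) 0,
      hkeys2]
    exact List.map_congr_left (fun k _ => by rw [hval k])
  rw [hitems, List.foldl_map]
  have h2 := PySem.List.foldl_append_if (fun k => decide ((list1.count k : Int) > 1)) id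
    (PySem.Set.ofList list1) []
  simp only [decide_eq_true_eq, id_eq, List.nil_append, List.map_id] at h2
  dsimp only
  rw [h2]
  unfold repeatedOf
  exact List.filter_congr (fun k _ => by simp)

theorem alt_fold_invariant (list1 : List String) (l : List String) :
    ∀ s : PySem.Set String,
    l.foldl (fun result w =>
        if 1 < PySem.List.count list1 w ∧ w ∉ result then result ++ [w] else result)
      (s.filter (fun w => 1 < list1.count w))
    = (PySem.Set.update s l).filter (fun w => 1 < list1.count w) := by
  induction l with
  | nil => intro s; rfl
  | cons x xs ih =>
      intro s
      have hstep : (if 1 < PySem.List.count list1 x ∧ x ∉ s.filter (fun w => 1 < list1.count w)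
            then s.filter (fun w => 1 < list1.count w) ++ [x]
            else s.filter (fun w => 1 < list1.count w))
          = (PySem.Set.add s x).filter (fun w => 1 < list1.count w) := by
        by_cases hmem : x ∈ s
        · have hadd : PySem.Set.add s x = s := by
            simp [PySem.Set.add, hmem]
          rw [hadd]
          by_cases hc : 1 < list1.count x
          · have : x ∈ s.filter (fun w => 1 < list1.count w) := by
              simp [List.mem_filter, hmem, hc]
            simp [PySem.List.count_eq, this]
          · simp [PySem.List.count_eq, hc]
        · have hadd : PySem.Set.add s x = s ++ [x] := by
            simp [PySem.Set.add, hmem]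
          have hnot : x ∉ s.filter (fun w => 1 < list1.count w) := by
            intro h; exact hmem (List.mem_of_mem_filter h)
          rw [hadd, List.filter_append]
          by_cases hc : 1 < list1.count x
          · simp [PySem.List.count_eq, hc, hnot]
          · simp [PySem.List.count_eq, hc]
      show List.foldl _ (if 1 < PySem.List.count list1 x ∧ x ∉ _ then _ else _) xs = _
      rw [hstep]
      exact ih (PySem.Set.add s x)

theorem commonWords_alt_eq_repeated (list1 : List String) :
    commonWords_alt list1 = repeatedOf list1 := by
  unfold commonWords_alt repeatedOf
  have := alt_fold_invariant list1 list1 PySem.Set.empty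
  simpa [PySem.Set.empty, PySem.Set.update, PySem.Set.ofList] using this

-- ===== VERDICT (by name: the statement is the Claim_ definition above) =====
theorem commonWords_spec : Claim_equal_commonWords := by
  intro list1 _
  unfold Spec_commonWords
  rw [commonWords_eq_repeated, commonWords_alt_eq_repeated]
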